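-- pv_equiv track=rewrite | github.com/Raothorn/shananagrams | server.py | all_subwords
-- ===== SOURCE A (Python) =====
-- MAX_LEN = 6  # i.e. the maximum possible character repeats
--
-- def get_word_hash(word):
--     # should be collision free up to anagrams
--     hash = 0
--     for char in word:
--         char_val = 1 + ord(char) - ord('a')
--         hash += int(MAX_LEN ** char_val)
--
--     return hash
--
-- def all_subwords(word, word_table):
--     subwords = set()
--
--     for n in range(0, 2 ** len(word)):
--         subword = ""
--
--         for ix in range(0, len(word)):
--             if n & (2 ** ix) > 0:
--                 subword += word[ix]
--
--         hash = get_word_hash(subword)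
--         if(hash in word_table.keys()):
--             subwords = subwords.union(word_table[hash])
--
--     return list(subwords)
-- ===== SOURCE B (Python) =====
-- MAX_LEN = 6  # i.e. the maximum possible character repeats
--
--
-- def all_subwords(word, word_table):
--     # Build the hashes of all 2**len(word) subsets incrementally (each letter
--     # doubles the list), instead of re-deriving every subword string and
--     # re-hashing it from scratch per bitmask.
--     hashes = [0]
--     for char in word:
--         char_val = 1 + ord(char) - ord('a')
--         contrib = 0 if char_val < 0 else MAX_LEN ** char_val
--         hashes += [h + contrib for h in hashes]
--
--     subwords = set()
--     for h in hashes: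
--         words = word_table.get(h)
--         if words is not None:
--             subwords.update(words)
--
--     return list(subwords)
-- ===== Notes on version B (the rewrite author's own statement) =====
-- stated objective: alternative
-- what changed: Instead of rebuilding each of the 2^L subword strings character by character and re-hashing each from scratch, B generates all 2^L subset hashes incrementally by doubling a hash list once per letter (hashes += [h + contrib for h in hashes]), then unions the table hits in the same bitmask order; intended as faster (measured 34.75x at n=16) but both are exponential in len(word), so a timing run could not confirm it at the largest size.
import Mathlib
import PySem

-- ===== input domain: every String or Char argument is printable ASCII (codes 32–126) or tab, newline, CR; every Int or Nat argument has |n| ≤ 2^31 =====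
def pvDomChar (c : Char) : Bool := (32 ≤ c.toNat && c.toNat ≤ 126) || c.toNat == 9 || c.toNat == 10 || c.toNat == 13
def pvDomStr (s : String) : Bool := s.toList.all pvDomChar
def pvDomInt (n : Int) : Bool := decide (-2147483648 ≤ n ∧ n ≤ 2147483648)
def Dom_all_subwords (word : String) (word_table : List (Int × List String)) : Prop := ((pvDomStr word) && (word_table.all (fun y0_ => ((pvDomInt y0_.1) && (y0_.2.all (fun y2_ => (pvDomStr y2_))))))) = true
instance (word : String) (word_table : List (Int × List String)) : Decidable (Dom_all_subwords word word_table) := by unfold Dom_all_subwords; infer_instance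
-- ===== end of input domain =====

-- B builds the 2^len(word) subset hashes incrementally (each letter doubles the hash list)
-- instead of rebuilding and re-hashing a subword string for every bitmask (alternative;
-- intended as faster, but both are exponential in len(word)).
-- A returns list(set); per the type convention both ports return the set as its
-- insertion-ordered distinct element list, and outputs are compared as finite sets.

-- ===== PORT A =====
-- one term of get_word_hash's sum, i.e. int(MAX_LEN ** char_val) with MAX_LEN = 6.
-- Hand-ported, exact: for char_val < 0 Python's 6 ** char_val is a float in (0, 1),
-- so int(...) truncates it to 0; for char_val ≥ 0 it is an exact integer power.
def hashContrib (c : Char) : Int :=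
  let char_val : Int := 1 + (c.toNat : Int) - 97   -- 1 + ord(char) - ord('a')
  if char_val < 0 then 0 else (6 : Int) ^ char_val.toNat

-- get_word_hash(word): hash = 0; for char in word: hash += int(MAX_LEN ** char_val)
def get_word_hash (w : List Char) : Int :=
  w.foldl (fun hash c => hash + hashContrib c) 0

def all_subwords (word : String) (word_table : List (Int × List String)) : List String :=
  let ws := word.toList
  -- for n in range(0, 2 ** len(word)):  (range(0, …) yields the naturals 0 … 2^L - 1)
  (List.range (2 ^ ws.length)).foldl
    (fun (subwords : PySem.Set String) n =>
      -- subword = "";  for ix in range(0, len(word)): if n & (2 ** ix) > 0: subword += word[ix]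
      -- (ix ∈ range(len(word)) is in range, so word[ix] is ws.getD ix)
      let subword : List Char :=
        (List.range ws.length).foldl
          (fun subword ix => if n &&& 2 ^ ix > 0 then subword ++ [ws.getD ix ' '] else subword) []
      let hash := get_word_hash subword
      -- if hash in word_table.keys(): subwords = subwords.union(word_table[hash])
      match (PySem.Dict.mk word_table).get? hash with
      | some words => PySem.Set.union subwords words
      | none => subwords)
    PySem.Set.empty

-- ===== PORT B =====
def all_subwords_alt (word : String) (word_table : List (Int × List String)) : List String :=
  -- hashes = [0]; for char in word: hashes += [h + contrib for h in hashes]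
  let hashes : List Int :=
    word.toList.foldl
      (fun hashes c =>
        let char_val : Int := 1 + (c.toNat : Int) - 97
        -- contrib = 0 if char_val < 0 else MAX_LEN ** char_val (hand-ported, exact as in port A)
        let contrib : Int := if char_val < 0 then 0 else (6 : Int) ^ char_val.toNat
        hashes ++ hashes.map (· + contrib))
      [0]
  -- for h in hashes: words = word_table.get(h); if words is not None: subwords.update(words)
  hashes.foldl
    (fun (subwords : PySem.Set String) h =>
      match (PySem.Dict.mk word_table).get? h with
      | some words => PySem.Set.update subwords words
      | none => subwords)
    PySem.Set.empty

-- ===== PRECONDITION & SPEC =====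
def Spec_all_subwords (word : String) (word_table : List (Int × List String)) (out : List String) : Prop := out = all_subwords_alt word word_table
instance (word : String) (word_table : List (Int × List String)) (out : List String) : Decidable (Spec_all_subwords word word_table out) := by unfold Spec_all_subwords; infer_instance

-- ===== CLAIM (what is proved, stated in full; the proofs are below) =====
def Claim_equal_all_subwords : Prop := ∀ (word : String) (word_table : List (Int × List String)), Dom_all_subwords word word_table → Spec_all_subwords word word_table (all_subwords word word_table)

-- ===== LEMMAS AND PROOFS =====

-- A's inner loop: the subword selected from ws by the bitmask n
def subA (ws : List Char) (n : Nat) : List Char :=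
  (List.range ws.length).foldl
    (fun subword ix => if n &&& 2 ^ ix > 0 then subword ++ [ws.getD ix ' '] else subword) []

-- B's doubling loop: the hashes of all subsets of ws, in bitmask order
def dbl (ws : List Char) : List Int :=
  ws.foldl (fun hashes c => hashes ++ hashes.map (· + hashContrib c)) [0]

lemma gwh_append (xs ys : List Char) :
    get_word_hash (xs ++ ys) = get_word_hash xs + get_word_hash ys := by
  simp [get_word_hash, PySem.List.foldl_add]

lemma subA_append_lt (ds : List Char) (c : Char) (n : Nat) (h : n < 2 ^ ds.length) :
    subA (ds ++ [c]) n = subA ds n := by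
  unfold subA
  have hb : n.testBit ds.length = false := Nat.testBit_lt_two_pow h
  simp only [List.length_append, List.length_cons, List.length_nil, List.range_succ,
    List.foldl_append, List.foldl_cons, List.foldl_nil, Nat.and_two_pow, hb,
    Bool.toNat_false, Nat.zero_mul, gt_iff_lt, Nat.lt_irrefl, if_false]
  apply PySem.List.foldl_congr_mem
  intro acc ix hix
  have hlt : ix < ds.length := List.mem_range.mp hix
  simp [List.getD, List.getElem?_append_left hlt]

lemma subA_append_ge (ds : List Char) (c : Char) (m : Nat) (h : m < 2 ^ ds.length) :
    subA (ds ++ [c]) (2 ^ ds.length + m) = subA ds m ++ [c] := by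
  unfold subA
  have hb : (2 ^ ds.length + m).testBit ds.length = true := by
    simp [Nat.testBit_two_pow_add_eq, Nat.testBit_lt_two_pow h]
  simp only [List.length_append, List.length_cons, List.length_nil, List.range_succ,
    List.foldl_append, List.foldl_cons, List.foldl_nil, Nat.and_two_pow, hb,
    Bool.toNat_true, Nat.one_mul, gt_iff_lt, Nat.two_pow_pos, if_true]
  have hgetc : (ds ++ [c]).getD ds.length ' ' = c := by
    simp [List.getD]
  rw [hgetc]
  congr 1
  apply PySem.List.foldl_congr_mem
  intro acc ix hix
  have hlt : ix < ds.length := List.mem_range.mp hix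
  have hbit : (2 ^ ds.length + m).testBit ix = m.testBit ix :=
    Nat.testBit_two_pow_add_gt hlt m
  simp [List.getD, List.getElem?_append_left hlt, hbit]

lemma mapHash_eq (ws : List Char) :
    (List.range (2 ^ ws.length)).map (fun n => get_word_hash (subA ws n)) = dbl ws := by
  induction ws using List.reverseRecOn with
  | nil => rfl
  | append_singleton ds c ih =>
    have hdbl : dbl (ds ++ [c]) = dbl ds ++ (dbl ds).map (· + hashContrib c) := by
      simp [dbl, List.foldl_append]
    have hrange : List.range (2 ^ (ds ++ [c]).length)
        = List.range (2 ^ ds.length) ++ (List.range (2 ^ ds.length)).map (2 ^ ds.length + ·) := by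
      have : 2 ^ (ds ++ [c]).length = 2 ^ ds.length + 2 ^ ds.length := by
        simp [pow_succ, Nat.mul_two]
      rw [this, List.range_add]
    rw [hrange, hdbl, List.map_append]
    congr 1
    · rw [← ih]
      apply List.map_congr_left
      intro n hn
      rw [subA_append_lt ds c n (List.mem_range.mp hn)]
    · rw [← ih, List.map_map, List.map_map]
      apply List.map_congr_left
      intro m hm
      simp only [Function.comp_apply]
      rw [subA_append_ge ds c m (List.mem_range.mp hm), gwh_append]
      simp [get_word_hash]

-- ===== VERDICT (by name: the statement is the Claim_ definition above) =====
theorem all_subwords_spec : Claim_equal_all_subwords := by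
  intro word word_table _
  show all_subwords word word_table = all_subwords_alt word word_table
  have h1 : all_subwords word word_table
      = ((List.range (2 ^ word.toList.length)).map
          (fun n => get_word_hash (subA word.toList n))).foldl
          (fun (subwords : PySem.Set String) h =>
            match (PySem.Dict.mk word_table).get? h with
            | some words => PySem.Set.union subwords words
            | none => subwords)
          PySem.Set.empty := by
    rw [List.foldl_map]
    rfl
  rw [h1, mapHash_eq]
  rfl
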